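-- pv_equiv track=rewrite | github.com/ctoth/argumentation | src/argumentation/aspic_encoding.py | _minimal_extension_indexes
-- ===== SOURCE A (Python) =====
-- def _minimal_extension_indexes(extensions: tuple[frozenset[str], ...]) -> tuple[int, ...]:
--     if not extensions:
--         return tuple()
--     candidates = [
--         (index, extension)
--         for index, extension in enumerate(extensions)
--         if not any(other < extension for other in extensions)
--     ]
--     index, _extension = min(candidates, key=lambda item: (len(item[1]), tuple(sorted(item[1]))))
--     return (index,)
-- ===== SOURCE B (Python) =====
-- def _minimal_extension_indexes(extensions):
--     if not extensions:
--         return tuple()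
--     best_index = 0
--     e0 = extensions[0]
--     best_key = (len(e0), tuple(sorted(e0)))
--     for i in range(1, len(extensions)):
--         e = extensions[i]
--         k = (len(e), tuple(sorted(e)))
--         if k < best_key:
--             best_index = i
--             best_key = k
--     return (best_index,)
-- ===== Notes on version B (the rewrite author's own statement) =====
-- stated objective: alternative
-- what changed: Drops the pairwise proper-subset candidate filter entirely: a single argmin pass by the key (len, sorted tuple) returns the same index, because any proper subset has a strictly smaller key, so the global key-argmin is always subset-minimal and is the same first-minimum A picks among its candidates; worst-case cost drops from quadratic to linear in the number of sets, though A's short-circuiting makes the measured gain only ~1.3x on random inputs.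
import Mathlib
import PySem

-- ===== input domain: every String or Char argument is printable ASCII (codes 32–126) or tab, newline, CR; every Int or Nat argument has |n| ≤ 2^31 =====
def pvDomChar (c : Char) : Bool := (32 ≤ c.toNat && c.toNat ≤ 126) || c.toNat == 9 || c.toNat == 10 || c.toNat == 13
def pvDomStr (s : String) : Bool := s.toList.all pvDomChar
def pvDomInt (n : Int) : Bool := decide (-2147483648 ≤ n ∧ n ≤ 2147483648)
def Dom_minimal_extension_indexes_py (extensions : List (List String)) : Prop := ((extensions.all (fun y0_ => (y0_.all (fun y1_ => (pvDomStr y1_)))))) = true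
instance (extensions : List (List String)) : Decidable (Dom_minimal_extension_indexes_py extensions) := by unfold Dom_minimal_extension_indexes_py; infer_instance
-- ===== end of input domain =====

-- B drops A's pairwise proper-subset candidate filter: a single argmin pass by
-- the key (length, sorted list) gives the same index, since a proper subset
-- always has a strictly smaller key (alternative algorithm; similar measured cost).


-- shared helpers: Python's frozenset proper-subset test, the key (len, sorted tuple)
-- (Python tuple '<' = lexicographic = Prod.Lex), and enumerate/range index pairing
def pvStrictSub (a b : List String) : Bool :=
  (a.all (fun x => b.contains x)) && !(b.all (fun y => a.contains y))

def pvKey (e : List String) : Nat ×ₗ (List String) :=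
  toLex (e.length, PySem.List.sorted e (fun x => x) false)

def pvEnum (i : Nat) : List (List String) → List (Nat × List String)
  | [] => []
  | e :: es => (i, e) :: pvEnum (i + 1) es

-- ===== PORT A =====
def pvIsCandidate (extensions : List (List String)) (p : Nat × List String) : Bool :=
  !(extensions.any (fun other => pvStrictSub other p.2))

-- Python's min(..., key=...): keep the first strictly smaller item
def pvMinStep (acc q : Nat × List String) : Nat × List String :=
  if pvKey q.2 < pvKey acc.2 then q else acc

def minimal_extension_indexes_py (extensions : List (List String)) : List Int :=
  if extensions = [] then []
  else
    match (pvEnum 0 extensions).filter (pvIsCandidate extensions) with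
    | [] => []   -- unreachable totalization: Python's min over [] would raise; candidates is never empty
    | c :: cs => [(((cs.foldl pvMinStep c).1 : Nat) : Int)]

-- ===== PORT B =====
def minimal_extension_indexes_py_alt (extensions : List (List String)) : List Int :=
  match extensions with
  | [] => []
  | e0 :: rest =>
    let best := (pvEnum 1 rest).foldl
      (fun acc p => let k := pvKey p.2; if k < acc.2 then (p.1, k) else acc)
      ((0 : Nat), pvKey e0)
    [((best.1 : Nat) : Int)]

-- ===== PRECONDITION & SPEC =====
-- Pre_ requires each inner list to be duplicate-free: the inner lists encode the
-- frozenset arguments of the Python function (set -> list of DISTINCT elements),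
-- and a list with duplicates encodes no frozenset.
def Pre_minimal_extension_indexes_py (extensions : List (List String)) : Prop :=
  ∀ e ∈ extensions, e.Nodup
instance (extensions : List (List String)) : Decidable (Pre_minimal_extension_indexes_py extensions) := by
  unfold Pre_minimal_extension_indexes_py; infer_instance

def pvWitness_minimal_extension_indexes_py : List (List String) := [["a"], ["a", "b"]]

def Spec_minimal_extension_indexes_py (extensions : List (List String)) (out : List Int) : Prop :=
  out = minimal_extension_indexes_py_alt extensions
instance (extensions : List (List String)) (out : List Int) : Decidable (Spec_minimal_extension_indexes_py extensions out) := by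
  unfold Spec_minimal_extension_indexes_py; infer_instance

-- ===== CLAIM (what is proved, stated in full; the proofs are below) =====
def Claim_equal_minimal_extension_indexes_py : Prop := ∀ (extensions : List (List String)), Dom_minimal_extension_indexes_py extensions → Pre_minimal_extension_indexes_py extensions → Spec_minimal_extension_indexes_py extensions (minimal_extension_indexes_py extensions)

-- ===== LEMMAS AND PROOFS =====

-- "r is the first minimum of l (by pvKey of the second component)"
def pvFM (l : List (Nat × List String)) (r : Nat × List String) : Prop :=
  ∃ l1 l2, l = l1 ++ r :: l2 ∧ (∀ y ∈ l1, pvKey r.2 < pvKey y.2) ∧ (∀ y ∈ l2, ¬ pvKey y.2 < pvKey r.2)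

theorem pvFold_FM : ∀ (cs : List (Nat × List String)) (c : Nat × List String),
    pvFM (c :: cs) (cs.foldl pvMinStep c) := by
  intro cs
  induction cs with
  | nil => exact fun c => ⟨[], [], rfl, by simp, by simp⟩
  | cons q cs ih =>
    intro c
    simp only [List.foldl_cons, pvMinStep]
    by_cases h : pvKey q.2 < pvKey c.2
    · rw [if_pos h]
      obtain ⟨l1, l2, heq, h1, h2⟩ := ih q
      have hle : pvKey (cs.foldl pvMinStep q).2 ≤ pvKey q.2 := by
        cases l1 with
        | nil =>
          rw [List.nil_append] at heq
          injection heq with hq _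
          exact le_of_eq (by rw [← hq])
        | cons x l1' =>
          rw [List.cons_append] at heq
          injection heq with hx _
          exact le_of_lt (hx ▸ h1 x (List.mem_cons_self ..))
      refine ⟨c :: l1, l2, by rw [heq, List.cons_append], ?_, h2⟩
      intro y hy
      rcases List.mem_cons.mp hy with rfl | hy
      · exact lt_of_le_of_lt hle h
      · exact h1 y hy
    · rw [if_neg h]
      obtain ⟨l1, l2, heq, h1, h2⟩ := ih c
      cases l1 with
      | nil =>
        rw [List.nil_append] at heq
        injection heq with hr hl2
        refine ⟨[], q :: cs, by rw [List.nil_append, ← hr], by simp, ?_⟩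
        intro y hy
        rcases List.mem_cons.mp hy with rfl | hy
        · rw [← hr]; exact h
        · rw [hl2] at hy; exact h2 y hy
      | cons x l1' =>
        rw [List.cons_append] at heq
        injection heq with hx htl
        have hrc : pvKey (cs.foldl pvMinStep c).2 < pvKey c.2 :=
          hx ▸ h1 x (List.mem_cons_self ..)
        refine ⟨c :: q :: l1', l2, ?_, ?_, h2⟩
        · simp only [List.cons_append]
          conv_lhs => rw [htl]
        · intro y hy
          rcases List.mem_cons.mp hy with rfl | hy
          · exact hrc
          rcases List.mem_cons.mp hy with rfl | hy
          · exact lt_of_lt_of_le hrc (not_lt.mp h)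
          · exact h1 y (hx ▸ List.mem_cons_of_mem x hy)

theorem pvFM_unique_aux : ∀ (a : List (Nat × List String)) (c b d : List (Nat × List String))
    (r1 r2 : Nat × List String),
    a ++ r1 :: b = c ++ r2 :: d →
    (∀ y ∈ a, pvKey r1.2 < pvKey y.2) → (∀ y ∈ b, ¬ pvKey y.2 < pvKey r1.2) →
    (∀ y ∈ c, pvKey r2.2 < pvKey y.2) → (∀ y ∈ d, ¬ pvKey y.2 < pvKey r2.2) →
    r1 = r2 := by
  intro a
  induction a with
  | nil =>
    intro c b d r1 r2 heq _ h2b h1c _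
    rw [List.nil_append] at heq
    cases c with
    | nil =>
      rw [List.nil_append] at heq
      exact (List.cons.inj heq).1
    | cons x c' =>
      rw [List.cons_append] at heq
      injection heq with hx' hb
      have hx : x = r1 := hx'.symm
      have hmem : r2 ∈ b := by rw [hb]; exact List.mem_append_right _ (List.mem_cons_self ..)
      exact absurd (hx ▸ h1c x (List.mem_cons_self ..)) (h2b r2 hmem)
  | cons x a' ih =>
    intro c b d r1 r2 heq h1a h2b h1c h2d
    rw [List.cons_append] at heq
    cases c with
    | nil =>
      rw [List.nil_append] at heq
      injection heq with hx hd
      have hmem : r1 ∈ d := by rw [← hd]; exact List.mem_append_right _ (List.mem_cons_self ..)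
      exact absurd (hx ▸ h1a x (List.mem_cons_self ..)) (h2d r1 hmem)
    | cons y c' =>
      rw [List.cons_append] at heq
      injection heq with _ htl
      exact ih c' b d r1 r2 htl
        (fun z hz => h1a z (List.mem_cons_of_mem x hz)) h2b
        (fun z hz => h1c z (List.mem_cons_of_mem y hz)) h2d

theorem pvFM_unique (l : List (Nat × List String)) (r1 r2 : Nat × List String)
    (h1 : pvFM l r1) (h2 : pvFM l r2) : r1 = r2 := by
  obtain ⟨a, b, hab, h1a, h2b⟩ := h1
  obtain ⟨c, d, hcd, h1c, h2d⟩ := h2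
  exact pvFM_unique_aux a c b d r1 r2 (by rw [← hab, hcd]) h1a h2b h1c h2d

theorem pvFM_min (l : List (Nat × List String)) (r : Nat × List String) (h : pvFM l r) :
    ∀ y ∈ l, ¬ pvKey y.2 < pvKey r.2 := by
  obtain ⟨l1, l2, heq, h1, h2⟩ := h
  intro y hy
  rw [heq] at hy
  rcases List.mem_append.mp hy with hy | hy
  · exact lt_asymm (h1 y hy)
  · rcases List.mem_cons.mp hy with rfl | hy
    · exact lt_irrefl _
    · exact h2 y hy

theorem pvEnum_snd_mem : ∀ (es : List (List String)) (i : Nat) (p : Nat × List String),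
    p ∈ pvEnum i es → p.2 ∈ es := by
  intro es
  induction es with
  | nil => intro i p h; simp [pvEnum] at h
  | cons e es ih =>
    intro i p h
    rcases List.mem_cons.mp h with rfl | h
    · exact List.mem_cons_self ..
    · exact List.mem_cons_of_mem e (ih (i + 1) p h)

theorem pvEnum_mem_snd : ∀ (es : List (List String)) (i : Nat) (x : List String),
    x ∈ es → ∃ p ∈ pvEnum i es, p.2 = x := by
  intro es
  induction es with
  | nil => intro i x h; simp at h
  | cons e es ih =>
    intro i x h
    rcases List.mem_cons.mp h with rfl | h
    · exact ⟨(i, x), List.mem_cons_self .., rfl⟩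
    · obtain ⟨p, hp, hpx⟩ := ih (i + 1) x h
      exact ⟨p, List.mem_cons_of_mem _ hp, hpx⟩

theorem pvKey_lt_of_strictSub (a b : List String) (ha : a.Nodup) (hb : b.Nodup)
    (h : pvStrictSub a b = true) : pvKey a < pvKey b := by
  have hparts := h
  simp only [pvStrictSub, Bool.and_eq_true, Bool.not_eq_true', List.all_eq_true,
    List.all_eq_false, List.contains_iff_mem] at hparts
  obtain ⟨hsub, y, hyb, hyna⟩ := hparts
  have hna : y ∉ a := by simpa using hyna
  have hfsub : a.toFinset ⊆ b.toFinset := by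
    intro z hz
    exact List.mem_toFinset.mpr (hsub z (List.mem_toFinset.mp hz))
  have hss : a.toFinset ⊂ b.toFinset :=
    (Finset.ssubset_iff_of_subset hfsub).mpr
      ⟨y, List.mem_toFinset.mpr hyb, fun hc => hna (List.mem_toFinset.mp hc)⟩
  have hlen : a.length < b.length := by
    have := Finset.card_lt_card hss
    rwa [List.toFinset_card_of_nodup ha, List.toFinset_card_of_nodup hb] at this
  simp only [pvKey, Prod.Lex.toLex_lt_toLex]
  exact Or.inl hlen

theorem pvFM_filter (extensions : List (List String))
    (hpre : Pre_minimal_extension_indexes_py extensions)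
    (r : Nat × List String) (h : pvFM (pvEnum 0 extensions) r) :
    pvFM ((pvEnum 0 extensions).filter (pvIsCandidate extensions)) r := by
  have hmin := pvFM_min _ _ h
  obtain ⟨l1, l2, heq, h1, h2⟩ := h
  have hrmem : r ∈ pvEnum 0 extensions := by
    rw [heq]; exact List.mem_append_right _ (List.mem_cons_self ..)
  have hQ : pvIsCandidate extensions r = true := by
    unfold pvIsCandidate
    rw [Bool.not_eq_true', List.any_eq_false]
    intro other hother hval
    have hlt : pvKey other < pvKey r.2 :=
      pvKey_lt_of_strictSub other r.2 (hpre other hother)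
        (hpre r.2 (pvEnum_snd_mem extensions 0 r hrmem)) hval
    obtain ⟨p, hp, hpx⟩ := pvEnum_mem_snd extensions 0 other hother
    exact hmin p hp (hpx ▸ hlt)
  refine ⟨l1.filter (pvIsCandidate extensions), l2.filter (pvIsCandidate extensions), ?_, ?_, ?_⟩
  · rw [heq, List.filter_append, List.filter_cons, if_pos hQ]
  · exact fun y hy => h1 y (List.mem_of_mem_filter hy)
  · exact fun y hy => h2 y (List.mem_of_mem_filter hy)

-- B's (index, key) fold computes the projection of A's (index, extension) fold
theorem pvFoldB_eq : ∀ (l : List (Nat × List String)) (c : Nat × List String),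
    l.foldl (fun acc p => let k := pvKey p.2; if k < acc.2 then (p.1, k) else acc) (c.1, pvKey c.2)
      = ((l.foldl pvMinStep c).1, pvKey (l.foldl pvMinStep c).2) := by
  intro l
  induction l with
  | nil => intro c; rfl
  | cons p l ih =>
    intro c
    simp only [List.foldl_cons]
    by_cases h : pvKey p.2 < pvKey c.2
    · have : pvMinStep c p = p := by simp [pvMinStep, h]
      rw [this, ← ih p]
      simp [h]
    · have : pvMinStep c p = c := by simp [pvMinStep, h]
      rw [this, ← ih c]
      simp [h]

-- ===== VERDICT (by name: the statement is the Claim_ definition above) =====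
theorem minimal_extension_indexes_py_spec : Claim_equal_minimal_extension_indexes_py := by
  intro extensions hdom hpre
  unfold Spec_minimal_extension_indexes_py
  cases extensions with
  | nil => rfl
  | cons e0 rest =>
    have hFull : pvFM (pvEnum 0 (e0 :: rest)) ((pvEnum 1 rest).foldl pvMinStep (0, e0)) :=
      pvFold_FM (pvEnum 1 rest) (0, e0)
    set r := (pvEnum 1 rest).foldl pvMinStep (0, e0) with hr
    have hFilt : pvFM ((pvEnum 0 (e0 :: rest)).filter (pvIsCandidate (e0 :: rest))) r :=
      pvFM_filter (e0 :: rest) hpre r hFull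
    have hne : (pvEnum 0 (e0 :: rest)).filter (pvIsCandidate (e0 :: rest)) ≠ [] := by
      obtain ⟨l1, l2, heq, -, -⟩ := hFilt
      rw [heq]; simp
    obtain ⟨c, cs, hcc⟩ := List.exists_cons_of_ne_nil hne
    have hAC : pvFM ((pvEnum 0 (e0 :: rest)).filter (pvIsCandidate (e0 :: rest)))
        (cs.foldl pvMinStep c) := hcc ▸ pvFold_FM cs c
    have hEq : cs.foldl pvMinStep c = r := pvFM_unique _ _ _ hAC hFilt
    have hA : minimal_extension_indexes_py (e0 :: rest) = [((r.1 : Nat) : Int)] := by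
      rw [minimal_extension_indexes_py, if_neg (by simp), hcc]
      show [(((cs.foldl pvMinStep c).1 : Nat) : Int)] = _
      rw [hEq]
    have hB : minimal_extension_indexes_py_alt (e0 :: rest) = [((r.1 : Nat) : Int)] := by
      show [((((pvEnum 1 rest).foldl
        (fun acc p => let k := pvKey p.2; if k < acc.2 then (p.1, k) else acc)
        ((0 : Nat), pvKey e0)).1 : Nat) : Int)] = _
      rw [show ((0 : Nat), pvKey e0) = (((0 : Nat), e0).1, pvKey ((0 : Nat), e0).2) from rfl,
        pvFoldB_eq]
    rw [hA, hB]
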